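-- pv_equiv track=rewrite | github.com/TuringLiu/dag_executor | dag_config/dag_generator.py | expand_DIY_type
-- ===== SOURCE A (Python) =====
-- def expand_DIY_type(DIY_type):
--     def dfs(diy_type):
--         diy_type = DIY_type[diy_type]
--         diy_type_name = []
--         for data_type, data_name in diy_type:
--             flag = 0
--             for diy in DIY_type.keys():
--                 if diy in data_type:
--                     flag = 1
--                     for son in dfs(diy):
--                         diy_type_name.append(data_name+ '.'+ son)
--             if flag == 0:
--                 diy_type_name.append(data_name)
--         return diy_type_name
--
--     DIY_expand = dict(list())
--     for key, d in DIY_type.items():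
--         DIY_expand[key] = dfs(key)
--     return DIY_expand
-- ===== SOURCE B (Python) =====
-- def expand_DIY_type(DIY_type):
--     # Memoized: each type's expansion is computed once and reused (A recomputes shared subtrees).
--     memo = {}
--
--     def solve(key):
--         if key in memo:
--             return memo[key]
--         out = []
--         for data_type, data_name in DIY_type[key]:
--             subs = [diy for diy in DIY_type if diy in data_type]
--             if not subs:
--                 out.append(data_name)
--             else:
--                 for diy in subs:
--                     out.extend(data_name + '.' + son for son in solve(diy))
--         memo[key] = out
--         return out
--
--     return {key: solve(key) for key in DIY_type}
-- ===== Notes on version B (the rewrite author's own statement) =====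
-- stated objective: alternative
-- what changed: B memoizes the per-key expansion in a dict and reuses stored results, and collects each field's matching keys with a filtered list and an explicit empty test, instead of A's plain dfs that re-expands shared subtrees on every reference and tracks a flag through a scan over all keys.
import Mathlib
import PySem

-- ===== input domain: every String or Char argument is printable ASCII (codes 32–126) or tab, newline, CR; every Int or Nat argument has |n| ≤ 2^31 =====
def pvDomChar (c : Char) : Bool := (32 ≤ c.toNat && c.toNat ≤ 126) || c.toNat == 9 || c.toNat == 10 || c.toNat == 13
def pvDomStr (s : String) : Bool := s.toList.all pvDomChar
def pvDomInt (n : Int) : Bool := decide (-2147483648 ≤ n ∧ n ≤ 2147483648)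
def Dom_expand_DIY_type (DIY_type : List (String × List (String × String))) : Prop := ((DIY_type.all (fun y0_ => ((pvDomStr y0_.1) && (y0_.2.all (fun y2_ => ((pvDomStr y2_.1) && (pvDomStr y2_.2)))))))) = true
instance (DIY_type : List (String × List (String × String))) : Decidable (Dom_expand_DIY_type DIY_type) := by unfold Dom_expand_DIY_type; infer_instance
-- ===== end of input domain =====

-- B is a memoized reimplementation: each type's expansion is stored in a dict and reused, where A's dfs re-expands every reference.

-- ===== PORT A =====
-- the recursive dfs of A; fuel makes it total (Python recurses without bound on cyclic
-- inputs — exactly those are excluded by Pre_ below; fuel never runs out under Pre_)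
def pvDfsA (d : PySem.Dict String (List (String × String))) (ks : List String) :
    Nat → String → List String
  | 0, _ => []
  | f + 1, k =>
    (d.getD k []).foldl (fun acc p =>
      let st := ks.foldl (fun (st : List String × Nat) diy =>
          if PySem.Str.isIn diy p.1 then
            (st.1 ++ (pvDfsA d ks f diy).map (fun son => p.2 ++ "." ++ son), 1)
          else st) (acc, 0)
      if st.2 = 0 then st.1 ++ [p.2] else st.1) []

def expand_DIY_type (DIY_type : List (String × List (String × String))) : List (String × List String) :=
  let d := PySem.Dict.ofList DIY_type
  (d.items.foldl
    (fun (e : PySem.Dict String (List String)) p => e.insert p.1 (pvDfsA d d.keys (d.size + 1) p.1))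
    PySem.Dict.empty).items

-- ===== PORT B =====
-- B's solve: memo threaded through; same fuel discipline as A's port (never exhausted under Pre_)
def pvSolveB (d : PySem.Dict String (List (String × String))) (ks : List String) :
    Nat → String → PySem.Dict String (List String) → List String × PySem.Dict String (List String)
  | 0, _, m => ([], m)
  | f + 1, k, m =>
    match m.get? k with
    | some v => (v, m)
    | none =>
      let r := (d.getD k []).foldl
        (fun (st : List String × PySem.Dict String (List String)) p =>
          let subs := ks.filter (fun diy => PySem.Str.isIn diy p.1)
          if subs.isEmpty then (st.1 ++ [p.2], st.2)
          else subs.foldl (fun st2 diy =>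
              let q := pvSolveB d ks f diy st2.2
              (st2.1 ++ q.1.map (fun son => p.2 ++ "." ++ son), q.2)) st)
        ([], m)
      (r.1, r.2.insert k r.1)

def expand_DIY_type_alt (DIY_type : List (String × List (String × String))) : List (String × List String) :=
  let d := PySem.Dict.ofList DIY_type
  (d.keys.foldl
    (fun (st : List (String × List String) × PySem.Dict String (List String)) k =>
      let q := pvSolveB d d.keys (d.size + 1) k st.2
      (st.1 ++ [(k, q.1)], q.2))
    ([], PySem.Dict.empty)).1

-- ===== PRECONDITION & SPEC =====
-- the keys a key's fields reference (the substring test of A's inner loop)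
def pvSuccs (d : PySem.Dict String (List (String × String))) (ks : List String) (k : String) : List String :=
  (d.getD k []).flatMap (fun p => ks.filter (fun diy => PySem.Str.isIn diy p.1))

-- pvChainBnd f k: every chain of reference edges of the input's type graph starting at k has
-- at most f edges. This is a shape property of the input's graph only (its edges are pvSuccs,
-- read off the input); it never computes any expansion, and boundedness of all chains by `size`
-- is exactly acyclicity of the finite reference graph, i.e. exactly termination of Python A.
def pvChainBnd (d : PySem.Dict String (List (String × String))) (ks : List String) :
    Nat → String → Bool
  | 0, k => (pvSuccs d ks k).isEmpty
  | f + 1, k => (pvSuccs d ks k).all (pvChainBnd d ks f)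

-- Pre_ excludes inputs whose substring-reference graph between DIY keys has a cycle: on those
-- Python A recurses forever (RecursionError); on a finite acyclic graph every chain has at most
-- `size` edges, so this is exactly termination of A.
def Pre_expand_DIY_type (DIY_type : List (String × List (String × String))) : Prop :=
  ∀ k ∈ (PySem.Dict.ofList DIY_type).keys,
    pvChainBnd (PySem.Dict.ofList DIY_type) (PySem.Dict.ofList DIY_type).keys
      (PySem.Dict.ofList DIY_type).size k = true
instance (DIY_type : List (String × List (String × String))) : Decidable (Pre_expand_DIY_type DIY_type) := by
  unfold Pre_expand_DIY_type; infer_instance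

def pvWitness_expand_DIY_type : (List (String × List (String × String))) :=
  [("point", [("int", "x"), ("int", "y")]), ("seg", [("point", "a"), ("point", "b")])]

def Spec_expand_DIY_type (DIY_type : List (String × List (String × String))) (out : List (String × List String)) : Prop := out = expand_DIY_type_alt DIY_type
instance (DIY_type : List (String × List (String × String))) (out : List (String × List String)) : Decidable (Spec_expand_DIY_type DIY_type out) := by unfold Spec_expand_DIY_type; infer_instance

-- ===== CLAIM (what is proved, stated in full; the proofs are below) =====
def Claim_equal_expand_DIY_type : Prop := ∀ (DIY_type : List (String × List (String × String))), Dom_expand_DIY_type DIY_type → Pre_expand_DIY_type DIY_type → Spec_expand_DIY_type DIY_type (expand_DIY_type DIY_type)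

-- ===== LEMMAS AND PROOFS =====

theorem pvSubs_subset_succs (d : PySem.Dict String (List (String × String))) (ks : List String)
    (k : String) (p : String × String) (hp : p ∈ d.getD k []) :
    ∀ diy ∈ (ks.filter (fun diy => PySem.Str.isIn diy p.1)), diy ∈ pvSuccs d ks k := by
  intro diy hdiy
  exact List.mem_flatMap.mpr ⟨p, hp, hdiy⟩

-- A's inner flag loop, in closed form
theorem pvFlagFold (ks : List String) (c : String → Bool) (rec : String → List String)
    (g : String → String) :
    ∀ acc fl, ks.foldl (fun (st : List String × Nat) diy =>
        if c diy then (st.1 ++ (rec diy).map g, 1) else st) (acc, fl)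
      = (acc ++ (ks.filter c).flatMap (fun diy => (rec diy).map g),
         if (ks.filter c).isEmpty then fl else 1) := by
  induction ks with
  | nil => intro acc fl; simp
  | cons x xs ih =>
    intro acc fl
    by_cases hx : c x = true
    · simp [hx, ih]
    · simp only [Bool.not_eq_true] at hx
      simp [hx, ih]

-- one unfolding of A's dfs, with the inner loop in closed form
theorem pvDfsA_succ (d : PySem.Dict String (List (String × String))) (ks : List String)
    (f : Nat) (k : String) :
    pvDfsA d ks (f + 1) k
      = (d.getD k []).flatMap (fun p =>
          if ((ks.filter (fun diy => PySem.Str.isIn diy p.1))).isEmpty then [p.2]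
          else ((ks.filter (fun diy => PySem.Str.isIn diy p.1))).flatMap (fun diy => (pvDfsA d ks f diy).map (fun son => p.2 ++ "." ++ son))) := by
  rw [pvDfsA]
  have hfun : (fun (acc : List String) (p : String × String) =>
      let st := ks.foldl (fun (st : List String × Nat) diy =>
          if PySem.Str.isIn diy p.1 then
            (st.1 ++ (pvDfsA d ks f diy).map (fun son => p.2 ++ "." ++ son), 1)
          else st) (acc, 0)
      if st.2 = 0 then st.1 ++ [p.2] else st.1)
      = (fun (acc : List String) (p : String × String) =>
          acc ++ (if ((ks.filter (fun diy => PySem.Str.isIn diy p.1))).isEmpty then [p.2]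
            else ((ks.filter (fun diy => PySem.Str.isIn diy p.1))).flatMap (fun diy => (pvDfsA d ks f diy).map (fun son => p.2 ++ "." ++ son)))) := by
    funext acc p
    rw [pvFlagFold ks (fun diy => PySem.Str.isIn diy p.1) (fun diy => pvDfsA d ks f diy)
        (fun son => p.2 ++ "." ++ son) acc 0]
    rcases hL : ks.filter (fun diy => PySem.Str.isIn diy p.1) with _ | ⟨x, xs⟩
    · simp
    · simp
  rw [hfun, PySem.List.foldl_append_eq_flatMap]
  simp

theorem pvDfsA_stable (d : PySem.Dict String (List (String × String))) (ks : List String) :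
    ∀ f g k, pvChainBnd d ks f k = true → f ≤ g →
      pvDfsA d ks (f + 1) k = pvDfsA d ks (g + 1) k := by
  intro f
  induction f with
  | zero =>
    intro g k h _
    rw [pvDfsA_succ, pvDfsA_succ]
    apply List.flatMap_congr
    intro p hp
    have hsub : (ks.filter (fun diy => PySem.Str.isIn diy p.1)) = [] := by
      simp only [pvChainBnd] at h
      rw [List.isEmpty_iff] at h
      rcases hvv : (ks.filter (fun diy => PySem.Str.isIn diy p.1)) with _ | ⟨x, xs⟩
      · rfl
      · exact absurd (pvSubs_subset_succs d ks k p hp x (by rw [hvv]; exact List.mem_cons_self))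
          (by rw [h]; exact List.not_mem_nil)
    rw [hsub]
    rfl
  | succ f ih =>
    intro g k h hle
    cases g with
    | zero => omega
    | succ g =>
      rw [pvDfsA_succ, pvDfsA_succ]
      apply List.flatMap_congr
      intro p hp
      by_cases he : ((ks.filter (fun diy => PySem.Str.isIn diy p.1))).isEmpty = true
      · rw [if_pos he, if_pos he]
      · rw [if_neg he, if_neg he]
        apply List.flatMap_congr
        intro diy hdiy
        have hb : pvChainBnd d ks f diy = true := by
          simp only [pvChainBnd, List.all_eq_true] at h
          exact h diy (pvSubs_subset_succs d ks k p hp diy hdiy)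
        rw [ih g diy hb (by omega)]

-- the memo invariant: every stored value is the true expansion
def pvGood (d : PySem.Dict String (List (String × String))) (ks : List String) (N : Nat)
    (m : PySem.Dict String (List String)) : Prop :=
  ∀ k v, m.get? k = some v → v = pvDfsA d ks (N + 1) k

theorem pvGood_empty (d : PySem.Dict String (List (String × String))) (ks : List String) (N : Nat) :
    pvGood d ks N PySem.Dict.empty := by
  intro k v h
  rw [PySem.Dict.get?_empty] at h
  cases h

theorem pvGood_insert (d : PySem.Dict String (List (String × String))) (ks : List String) (N : Nat)
    (m : PySem.Dict String (List String)) (k : String) (v : List String)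
    (hm : pvGood d ks N m) (hv : v = pvDfsA d ks (N + 1) k) :
    pvGood d ks N (m.insert k v) := by
  intro k' v' h
  by_cases hk : k' = k
  · subst hk
    rw [PySem.Dict.get?_insert_self] at h
    cases h
    exact hv
  · rw [PySem.Dict.get?_insert_of_ne m v hk] at h
    exact hm k' v' h

-- B's inner loop over the referencing keys of one field
theorem pvSubsFold (d : PySem.Dict String (List (String × String))) (ks : List String) (N f : Nat)
    (p : String × String)
    (hrec : ∀ diy ∈ (ks.filter (fun diy => PySem.Str.isIn diy p.1)), ∀ m, pvGood d ks N m →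
      (pvSolveB d ks f diy m).1 = pvDfsA d ks (N + 1) diy ∧
      pvGood d ks N (pvSolveB d ks f diy m).2) :
    ∀ (subs : List String), (∀ x ∈ subs, x ∈ (ks.filter (fun diy => PySem.Str.isIn diy p.1))) →
      ∀ (st : List String × PySem.Dict String (List String)), pvGood d ks N st.2 →
      (subs.foldl (fun st2 diy =>
          let q := pvSolveB d ks f diy st2.2
          (st2.1 ++ q.1.map (fun son => p.2 ++ "." ++ son), q.2)) st).1
        = st.1 ++ subs.flatMap (fun diy => (pvDfsA d ks (N + 1) diy).map (fun son => p.2 ++ "." ++ son)) ∧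
      pvGood d ks N (subs.foldl (fun st2 diy =>
          let q := pvSolveB d ks f diy st2.2
          (st2.1 ++ q.1.map (fun son => p.2 ++ "." ++ son), q.2)) st).2 := by
  intro subs
  induction subs with
  | nil => intro _ st hst; exact ⟨by simp, hst⟩
  | cons x xs ih =>
    intro hmem st hst
    have hx := hrec x (hmem x List.mem_cons_self) st.2 hst
    have := ih (fun y hy => hmem y (List.mem_cons_of_mem x hy))
      (st.1 ++ (pvSolveB d ks f x st.2).1.map (fun son => p.2 ++ "." ++ son),
       (pvSolveB d ks f x st.2).2) hx.2
    simp only [List.foldl_cons]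
    refine ⟨?_, this.2⟩
    rw [this.1]
    simp [hx.1]

-- B's loop over the fields of one key
theorem pvFieldsFold (d : PySem.Dict String (List (String × String))) (ks : List String) (N f : Nat)
    (fields : List (String × String))
    (hrec : ∀ p ∈ fields, ∀ diy ∈ (ks.filter (fun diy => PySem.Str.isIn diy p.1)), ∀ m, pvGood d ks N m →
      (pvSolveB d ks f diy m).1 = pvDfsA d ks (N + 1) diy ∧
      pvGood d ks N (pvSolveB d ks f diy m).2) :
    ∀ (st : List String × PySem.Dict String (List String)), pvGood d ks N st.2 →
      (fields.foldl (fun (st : List String × PySem.Dict String (List String)) p =>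
          let subs := ks.filter (fun diy => PySem.Str.isIn diy p.1)
          if subs.isEmpty then (st.1 ++ [p.2], st.2)
          else subs.foldl (fun st2 diy =>
              let q := pvSolveB d ks f diy st2.2
              (st2.1 ++ q.1.map (fun son => p.2 ++ "." ++ son), q.2)) st) st).1
        = st.1 ++ fields.flatMap (fun p =>
            if ((ks.filter (fun diy => PySem.Str.isIn diy p.1))).isEmpty then [p.2]
            else ((ks.filter (fun diy => PySem.Str.isIn diy p.1))).flatMap (fun diy => (pvDfsA d ks (N + 1) diy).map (fun son => p.2 ++ "." ++ son))) ∧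
      pvGood d ks N (fields.foldl (fun (st : List String × PySem.Dict String (List String)) p =>
          let subs := ks.filter (fun diy => PySem.Str.isIn diy p.1)
          if subs.isEmpty then (st.1 ++ [p.2], st.2)
          else subs.foldl (fun st2 diy =>
              let q := pvSolveB d ks f diy st2.2
              (st2.1 ++ q.1.map (fun son => p.2 ++ "." ++ son), q.2)) st) st).2 := by
  induction fields with
  | nil => intro st hst; exact ⟨by simp, hst⟩
  | cons p ps ih =>
    intro st hst
    have hrec' := fun q hq => hrec q (List.mem_cons_of_mem p hq)
    simp only [List.foldl_cons, List.flatMap_cons]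
    by_cases he : ((ks.filter (fun diy => PySem.Str.isIn diy p.1))).isEmpty = true
    · rw [if_pos he, if_pos he]
      have := ih hrec' (st.1 ++ [p.2], st.2) hst
      exact ⟨by rw [this.1]; simp, this.2⟩
    · rw [if_neg he, if_neg he]
      have hsf := pvSubsFold d ks N f p (hrec p List.mem_cons_self) ((ks.filter (fun diy => PySem.Str.isIn diy p.1)))
        (fun x hx => hx) st hst
      have := ih hrec' _ hsf.2
      exact ⟨by rw [this.1, hsf.1]; simp, this.2⟩

-- B's solve returns the true expansion and preserves the memo invariant
theorem pvSolveB_correct (d : PySem.Dict String (List (String × String))) (ks : List String) (N : Nat) :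
    ∀ f, f ≤ N → ∀ k m, pvChainBnd d ks f k = true → pvGood d ks N m →
      (pvSolveB d ks (f + 1) k m).1 = pvDfsA d ks (N + 1) k ∧
      pvGood d ks N (pvSolveB d ks (f + 1) k m).2 := by
  intro f
  induction f with
  | zero =>
    intro _ k m hb hm
    have hsubs : ∀ p ∈ d.getD k [], (ks.filter (fun diy => PySem.Str.isIn diy p.1)) = [] := by
      intro p hp
      simp only [pvChainBnd] at hb
      rw [List.isEmpty_iff] at hb
      rcases hvv : (ks.filter (fun diy => PySem.Str.isIn diy p.1)) with _ | ⟨x, xs⟩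
      · rfl
      · exact absurd (pvSubs_subset_succs d ks k p hp x (by rw [hvv]; exact List.mem_cons_self))
          (by rw [hb]; exact List.not_mem_nil)
    rw [pvSolveB]
    cases hmk : m.get? k with
    | some v => exact ⟨hm k v hmk, hm⟩
    | none =>
      have hrec : ∀ p ∈ d.getD k [], ∀ diy ∈ (ks.filter (fun diy => PySem.Str.isIn diy p.1)), ∀ m', pvGood d ks N m' →
          (pvSolveB d ks 0 diy m').1 = pvDfsA d ks (N + 1) diy ∧
          pvGood d ks N (pvSolveB d ks 0 diy m').2 := by
        intro p hp diy hdiy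
        rw [hsubs p hp] at hdiy
        cases hdiy
      have hff := pvFieldsFold d ks N 0 (d.getD k []) hrec ([], m) hm
      have hval : (d.getD k []).flatMap (fun p =>
            if ((ks.filter (fun diy => PySem.Str.isIn diy p.1))).isEmpty then [p.2]
            else ((ks.filter (fun diy => PySem.Str.isIn diy p.1))).flatMap (fun diy => (pvDfsA d ks (N + 1) diy).map (fun son => p.2 ++ "." ++ son)))
          = pvDfsA d ks (N + 1) k := by
        rw [pvDfsA_succ]
        apply List.flatMap_congr
        intro p hp
        rw [hsubs p hp]
        rfl
      simp only at hff
      refine ⟨by rw [hff.1, hval]; simp, ?_⟩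
      apply pvGood_insert d ks N _ _ _ hff.2
      rw [hff.1, hval]; simp
  | succ f ih =>
    intro hle k m hb hm
    rw [pvSolveB]
    cases hmk : m.get? k with
    | some v => exact ⟨hm k v hmk, hm⟩
    | none =>
      have hrec : ∀ p ∈ d.getD k [], ∀ diy ∈ (ks.filter (fun diy => PySem.Str.isIn diy p.1)), ∀ m', pvGood d ks N m' →
          (pvSolveB d ks (f + 1) diy m').1 = pvDfsA d ks (N + 1) diy ∧
          pvGood d ks N (pvSolveB d ks (f + 1) diy m').2 := by
        intro p hp diy hdiy m' hm'
        have hbd : pvChainBnd d ks f diy = true := by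
          simp only [pvChainBnd, List.all_eq_true] at hb
          exact hb diy (pvSubs_subset_succs d ks k p hp diy hdiy)
        exact ih (by omega) diy m' hbd hm'
      have hff := pvFieldsFold d ks N (f + 1) (d.getD k []) hrec ([], m) hm
      have hval : (d.getD k []).flatMap (fun p =>
            if ((ks.filter (fun diy => PySem.Str.isIn diy p.1))).isEmpty then [p.2]
            else ((ks.filter (fun diy => PySem.Str.isIn diy p.1))).flatMap (fun diy => (pvDfsA d ks (N + 1) diy).map (fun son => p.2 ++ "." ++ son)))
          = pvDfsA d ks (N + 1) k := by
        rw [pvDfsA_succ]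
        apply List.flatMap_congr
        intro p hp
        by_cases he : ((ks.filter (fun diy => PySem.Str.isIn diy p.1))).isEmpty = true
        · rw [if_pos he, if_pos he]
        · rw [if_neg he, if_neg he]
          apply List.flatMap_congr
          intro diy hdiy
          have hbd : pvChainBnd d ks f diy = true := by
            simp only [pvChainBnd, List.all_eq_true] at hb
            exact hb diy (pvSubs_subset_succs d ks k p hp diy hdiy)
          obtain ⟨N', rfl⟩ : ∃ N', N = N' + 1 := ⟨N - 1, by omega⟩
          have e1 := pvDfsA_stable d ks f (N' + 1) diy hbd (by omega)
          have e2 := pvDfsA_stable d ks f N' diy hbd (by omega)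
          rw [← e1, e2]
      simp only at hff
      refine ⟨by rw [hff.1, hval]; simp, ?_⟩
      apply pvGood_insert d ks N _ _ _ hff.2
      rw [hff.1, hval]; simp

-- B's top-level loop over the keys
theorem pvTopFold (d : PySem.Dict String (List (String × String))) (ks : List String) (N : Nat) :
    ∀ (l : List String), (∀ k ∈ l, pvChainBnd d ks N k = true) →
      ∀ (st : List (String × List String) × PySem.Dict String (List String)), pvGood d ks N st.2 →
      (l.foldl (fun (st : List (String × List String) × PySem.Dict String (List String)) k =>
          let q := pvSolveB d ks (N + 1) k st.2
          (st.1 ++ [(k, q.1)], q.2)) st).1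
        = st.1 ++ l.map (fun k => (k, pvDfsA d ks (N + 1) k)) := by
  intro l
  induction l with
  | nil => intro _ st _; simp
  | cons x xs ih =>
    intro hb st hst
    have hx := pvSolveB_correct d ks N N (le_refl N) x st.2 (hb x List.mem_cons_self) hst
    simp only [List.foldl_cons]
    rw [ih (fun y hy => hb y (List.mem_cons_of_mem x hy))
        (st.1 ++ [(x, (pvSolveB d ks (N + 1) x st.2).1)], (pvSolveB d ks (N + 1) x st.2).2) hx.2]
    simp [hx.1]

-- ===== VERDICT (by name: the statement is the Claim_ definition above) =====
theorem expand_DIY_type_spec : Claim_equal_expand_DIY_type := by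
  intro DIY_type _ hpre
  unfold Spec_expand_DIY_type expand_DIY_type expand_DIY_type_alt
  simp only
  set d := PySem.Dict.ofList DIY_type with hd
  have hA : (d.items.foldl
      (fun (e : PySem.Dict String (List String)) p =>
        e.insert p.1 (pvDfsA d d.keys (d.size + 1) p.1)) PySem.Dict.empty).items
      = d.items.map (fun p => (p.1, pvDfsA d d.keys (d.size + 1) p.1)) := by
    rw [PySem.Dict.items_foldl_insert_fresh d.items (fun p => p.1)
        (fun p => pvDfsA d d.keys (d.size + 1) p.1) PySem.Dict.empty
        (fun a _ => PySem.Dict.contains_empty a.1)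
        (by exact PySem.Dict.nodup_keys_ofList DIY_type)]
    simp
    rfl
  have hB := pvTopFold d d.keys d.size d.keys (fun k hk => hpre k hk)
      ([], PySem.Dict.empty) (pvGood_empty d d.keys d.size)
  rw [hA, hB]
  show d.items.map (fun p => (p.1, pvDfsA d d.keys (d.size + 1) p.1))
      = [] ++ (d.items.map (fun p => p.1)).map (fun k => (k, pvDfsA d d.keys (d.size + 1) k))
  rw [List.map_map]
  simp
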